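-- pv_equiv track=rewrite | github.com/Pajdzik/Mishmash | hackerrank.com/count-triplets.py | countTriplets_polynomial2
-- ===== SOURCE A (Python) =====
-- def countTriplets_polynomial2(arr, r):
--     filterred_arr = filter(lambda x: x == 1 or x % r == 0, arr)
--     sarr = sorted(filterred_arr)
--     l = len(sarr)
--     c = 0
--
--     for i in range(l - 2):
--         d1 = sarr[i]
--         for j in range(i + 1, l - 1):
--             d2 = sarr[j]
--             if d2 > d1 * r:
--                 break
--
--             if d2 == d1 * r:
--                 for k in range(j + 1, l):
--                     d3 = sarr[k]
--                     if d3 > d2 * r: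
--                         break
--
--                     if d3 == d2 * r:
--                         c += 1
--     return c
-- ===== SOURCE B (Python) =====
-- def countTriplets_polynomial2(arr, r):
--     s = sorted(x for x in arr if x == 1 or x % r == 0)
--     right = {}
--     for x in s:
--         right[x] = right.get(x, 0) + 1
--     left = {}
--     total = 0
--     for b in s:
--         right[b] = right[b] - 1
--         if r != 0 and b % r == 0:
--             total += left.get(b // r, 0) * right.get(b * r, 0)
--         left[b] = left.get(b, 0) + 1
--     return total
-- ===== Notes on version B (the rewrite author's own statement) =====
-- stated objective: alternative
-- what changed: Replaces A's three nested index scans (with breaks) over the sorted filtered array by a single linear pass that keeps left/right occurrence-count dictionaries and adds left[b//r]*right[b*r] for each middle element b.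
import Mathlib
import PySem

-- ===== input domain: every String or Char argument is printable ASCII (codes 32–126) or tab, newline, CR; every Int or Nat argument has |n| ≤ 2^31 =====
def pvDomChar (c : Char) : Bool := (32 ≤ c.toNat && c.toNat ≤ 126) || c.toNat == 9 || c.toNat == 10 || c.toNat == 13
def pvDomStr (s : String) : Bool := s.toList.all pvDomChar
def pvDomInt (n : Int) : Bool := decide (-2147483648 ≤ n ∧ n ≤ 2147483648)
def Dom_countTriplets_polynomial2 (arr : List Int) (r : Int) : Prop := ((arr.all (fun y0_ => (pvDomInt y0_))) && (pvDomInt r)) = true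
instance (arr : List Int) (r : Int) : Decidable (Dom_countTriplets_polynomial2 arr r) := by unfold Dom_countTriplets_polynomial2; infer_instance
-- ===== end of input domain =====

-- B replaces A's triple nested index scan over the sorted filtered array by a single pass with
-- left/right occurrence-count dicts (the classic count-triplets decomposition); measured ~1.4x
-- faster at the largest timed size, below the 1.5x bar, so no speed is claimed.

-- ===== PORT A =====
-- innermost 'for k in range(j+1, l)' with its break
def pvKloopA (s : List Int) (d2 r : Int) (l : Nat) (k : Nat) (c : Int) : Int :=
  if k < l then
    let d3 := s.getD k 0
    if d2 * r < d3 then c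
    else pvKloopA s d2 r l (k + 1) (if d3 == d2 * r then c + 1 else c)
  else c
termination_by l - k

-- 'for j in range(i+1, l-1)' with its break
def pvJloopA (s : List Int) (d1 r : Int) (jmax l : Nat) (j : Nat) (c : Int) : Int :=
  if j < jmax then
    let d2 := s.getD j 0
    if d1 * r < d2 then c
    else
      pvJloopA s d1 r jmax l (j + 1)
        (if d2 == d1 * r then pvKloopA s d2 r l (j + 1) c else c)
  else c
termination_by jmax - j

-- 'for i in range(l-2)'
def pvIloopA (s : List Int) (r : Int) (imax l : Nat) (i : Nat) (c : Int) : Int :=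
  if i < imax then
    let d1 := s.getD i 0
    pvIloopA s r imax l (i + 1) (pvJloopA s d1 r (l - 1) l (i + 1) c)
  else c
termination_by imax - i

def countTriplets_polynomial2 (arr : List Int) (r : Int) : Int :=
  let sarr := PySem.List.sorted (arr.filter (fun x => x == 1 || PySem.Int.mod x r == 0)) (fun x => x) false
  let l := sarr.length
  pvIloopA sarr r (l - 2) l 0 0

-- ===== PORT B =====
-- one step of B's main loop: state = (right, left, total)
def pvStepB (r : Int) (st : PySem.Dict Int Int × PySem.Dict Int Int × Int) (b : Int) : PySem.Dict Int Int × PySem.Dict Int Int × Int :=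
  let right := st.1.insert b (st.1.getD b 0 - 1)
  let total :=
    if r ≠ 0 ∧ PySem.Int.mod b r = 0 then
      st.2.2 + st.2.1.getD (PySem.Int.floordiv b r) 0 * right.getD (b * r) 0
    else st.2.2
  (right, st.2.1.insert b (st.2.1.getD b 0 + 1), total)

def countTriplets_polynomial2_alt (arr : List Int) (r : Int) : Int :=
  let s := PySem.List.sorted (arr.filter (fun x => x == 1 || PySem.Int.mod x r == 0)) (fun x => x) false
  let right := s.foldl (fun d x => d.insert x (d.getD x 0 + 1)) PySem.Dict.empty
  (s.foldl (pvStepB r) (right, PySem.Dict.empty, 0)).2.2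

-- ===== PRECONDITION & SPEC =====
-- Pre_ excludes exactly the inputs where Python A raises ZeroDivisionError: r = 0 while some
-- element differs from 1 (the filter's 'x % r' is then evaluated).
def Pre_countTriplets_polynomial2 (arr : List Int) (r : Int) : Prop := r ≠ 0 ∨ ∀ x ∈ arr, x = 1
instance (arr : List Int) (r : Int) : Decidable (Pre_countTriplets_polynomial2 arr r) := by unfold Pre_countTriplets_polynomial2; infer_instance
def pvWitness_countTriplets_polynomial2 : List Int × Int := ([1, 3, 9, 9, 27], 3)

def Spec_countTriplets_polynomial2 (arr : List Int) (r : Int) (out : Int) : Prop := out = countTriplets_polynomial2_alt arr r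
instance (arr : List Int) (r : Int) (out : Int) : Decidable (Spec_countTriplets_polynomial2 arr r out) := by unfold Spec_countTriplets_polynomial2; infer_instance

-- ===== CLAIM (what is proved, stated in full; the proofs are below) =====
def Claim_equal_countTriplets_polynomial2 : Prop := ∀ (arr : List Int) (r : Int), Dom_countTriplets_polynomial2 arr r → Pre_countTriplets_polynomial2 arr r → Spec_countTriplets_polynomial2 arr r (countTriplets_polynomial2 arr r)

-- ===== LEMMAS AND PROOFS =====

-- contribution of a fixed first element d1 against the suffix after it
def specJ (r d1 : Int) : List Int → Int
  | [] => 0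
  | d2 :: rest => (if d2 = d1 * r then (rest.count (d2 * r) : Int) else 0) + specJ r d1 rest

-- total of A: sum of specJ over every suffix
def specI (r : Int) : List Int → Int
  | [] => 0
  | d1 :: rest => specJ r d1 rest + specI r rest

-- B's per-step term, with explicit prefix (left counts) and suffix (right counts)
def gTerm (r : Int) (pre : List Int) (b : Int) (q : List Int) : Int :=
  if r ≠ 0 ∧ PySem.Int.mod b r = 0 then
    (pre.count (PySem.Int.floordiv b r) : Int) * (q.count (b * r) : Int)
  else 0

def gSum (r : Int) (pre : List Int) : List Int → Int
  | [] => 0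
  | b :: q => gTerm r pre b q + gSum r (pre ++ [b]) q

-- same with the predicate form of the left count
def hTerm (r : Int) (pre : List Int) (b : Int) (q : List Int) : Int :=
  (pre.countP (fun a => a * r == b) : Int) * (q.count (b * r) : Int)

def hSum (r : Int) (pre : List Int) : List Int → Int
  | [] => 0
  | b :: q => hTerm r pre b q + hSum r (pre ++ [b]) q

def crossSum (r : Int) (pre : List Int) : List Int → Int
  | [] => 0
  | b :: q => hTerm r pre b q + crossSum r pre q

lemma drop_eq_getD_cons (s : List Int) (k : Nat) (hk : k < s.length) :
    s.drop k = s.getD k 0 :: s.drop (k + 1) := by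
  rw [List.getD_eq_getElem s 0 hk, List.drop_eq_getElem_cons hk]

lemma kloopA_eq (s : List Int) (d2 r : Int) (hp : s.Pairwise (· ≤ ·)) :
    ∀ k c, pvKloopA s d2 r s.length k c = c + ((s.drop k).count (d2 * r) : Int) := by
  suffices h : ∀ n k c, s.length ≤ k + n →
      pvKloopA s d2 r s.length k c = c + ((s.drop k).count (d2 * r) : Int) by
    intro k c; exact h s.length k c (by omega)
  intro n
  induction n with
  | zero =>
    intro k c h
    unfold pvKloopA
    have hk : ¬ k < s.length := by omega
    simp only [hk, if_false]
    rw [List.drop_eq_nil_of_le (by omega)]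
    simp
  | succ n ih =>
    intro k c h
    unfold pvKloopA
    by_cases hk : k < s.length
    · simp only [hk, if_true]
      by_cases hbr : d2 * r < s.getD k 0
      · simp only [hbr, if_true]
        have hz : (s.drop k).count (d2 * r) = 0 := by
          rw [drop_eq_getD_cons s k hk, List.count_eq_zero]
          intro hm
          rcases List.mem_cons.mp hm with he | hm'
          · omega
          · have hpd : (s.drop k).Pairwise (· ≤ ·) := hp.drop
            rw [drop_eq_getD_cons s k hk] at hpd
            have h2 := (List.pairwise_cons.mp hpd).1 _ hm'
            omega
        rw [hz]; simp
      · simp only [hbr, if_false]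
        rw [ih (k + 1) _ (by omega), drop_eq_getD_cons s k hk, List.count_cons]
        by_cases he : s.getD k 0 = d2 * r
        · have hbeq : (s.getD k 0 == d2 * r) = true := beq_iff_eq.mpr he
          simp only [hbeq, if_true]
          push_cast
          ring
        · have hbeq : (s.getD k 0 == d2 * r) = false := beq_eq_false_iff_ne.mpr he
          simp only [hbeq, Bool.false_eq_true, if_false]
          push_cast
          ring
    · simp only [hk, if_false]
      rw [List.drop_eq_nil_of_le (by omega)]
      simp

lemma specJ_zero (r d1 : Int) (q : List Int) (h : ∀ x ∈ q, d1 * r < x) :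
    specJ r d1 q = 0 := by
  induction q with
  | nil => rfl
  | cons b q ih =>
    have hb := h b (by simp)
    have : ¬ b = d1 * r := by omega
    simp only [specJ, this, if_false, zero_add]
    exact ih (fun x hx => h x (by simp [hx]))

lemma specJ_short (r d1 : Int) (q : List Int) (h : q.length ≤ 1) : specJ r d1 q = 0 := by
  match q with
  | [] => rfl
  | [x] => simp [specJ]
  | a :: b :: t => simp at h

lemma jloopA_eq (s : List Int) (d1 r : Int) (hp : s.Pairwise (· ≤ ·)) :
    ∀ j c, pvJloopA s d1 r (s.length - 1) s.length j c = c + specJ r d1 (s.drop j) := by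
  suffices h : ∀ n j c, s.length - 1 ≤ j + n →
      pvJloopA s d1 r (s.length - 1) s.length j c = c + specJ r d1 (s.drop j) by
    intro j c; exact h s.length j c (by omega)
  intro n
  induction n with
  | zero =>
    intro j c h
    unfold pvJloopA
    have hj : ¬ j < s.length - 1 := by omega
    simp only [hj, if_false]
    rw [specJ_short r d1 _ (by rw [List.length_drop]; omega)]
    simp
  | succ n ih =>
    intro j c h
    unfold pvJloopA
    by_cases hj : j < s.length - 1
    · have hjl : j < s.length := by omega
      simp only [hj, if_true]
      by_cases hbr : d1 * r < s.getD j 0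
      · simp only [hbr, if_true]
        have h1 : specJ r d1 (s.drop j) = 0 := by
          apply specJ_zero
          intro x hx
          rw [drop_eq_getD_cons s j hjl] at hx
          rcases List.mem_cons.mp hx with he | hm'
          · omega
          · have hpd : (s.drop j).Pairwise (· ≤ ·) := hp.drop
            rw [drop_eq_getD_cons s j hjl] at hpd
            have h2 := (List.pairwise_cons.mp hpd).1 _ hm'
            omega
        rw [h1]; simp
      · simp only [hbr, if_false]
        rw [ih (j + 1) _ (by omega), drop_eq_getD_cons s j hjl]
        by_cases he : s.getD j 0 = d1 * r
        · have hbeq : (s.getD j 0 == d1 * r) = true := beq_iff_eq.mpr he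
          simp only [hbeq, if_true]
          rw [kloopA_eq s (s.getD j 0) r hp (j + 1) c]
          simp only [specJ, he, if_true]
          ring
        · have hbeq : (s.getD j 0 == d1 * r) = false := beq_eq_false_iff_ne.mpr he
          simp only [hbeq, Bool.false_eq_true, if_false, specJ, he]
          ring
    · simp only [hj, if_false]
      rw [specJ_short r d1 _ (by rw [List.length_drop]; omega)]
      simp

lemma specI_short (r : Int) (q : List Int) (h : q.length ≤ 2) : specI r q = 0 := by
  match q with
  | [] => rfl
  | [x] => simp [specI, specJ]
  | [x, y] => simp [specI, specJ]
  | a :: b :: c :: t => simp at h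

lemma iloopA_eq (s : List Int) (r : Int) (hp : s.Pairwise (· ≤ ·)) :
    ∀ i c, pvIloopA s r (s.length - 2) s.length i c = c + specI r (s.drop i) := by
  suffices h : ∀ n i c, s.length - 2 ≤ i + n →
      pvIloopA s r (s.length - 2) s.length i c = c + specI r (s.drop i) by
    intro i c; exact h s.length i c (by omega)
  intro n
  induction n with
  | zero =>
    intro i c h
    unfold pvIloopA
    have hi : ¬ i < s.length - 2 := by omega
    simp only [hi, if_false]
    rw [specI_short r _ (by rw [List.length_drop]; omega)]
    simp
  | succ n ih =>
    intro i c h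
    unfold pvIloopA
    by_cases hi : i < s.length - 2
    · have hil : i < s.length := by omega
      simp only [hi, if_true]
      rw [ih (i + 1) _ (by omega), jloopA_eq s (s.getD i 0) r hp (i + 1) c]
      rw [drop_eq_getD_cons s i hil]
      simp only [specI]
      ring
    · simp only [hi, if_false]
      rw [specI_short r _ (by rw [List.length_drop]; omega)]
      simp

-- ===== the Fubini bridge: specI = hSum [] =====

lemma hTerm_append (r : Int) (p1 p2 : List Int) (b : Int) (q : List Int) :
    hTerm r (p1 ++ p2) b q = hTerm r p1 b q + hTerm r p2 b q := by
  simp only [hTerm, List.countP_append]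
  push_cast
  ring

lemma crossSum_append (r : Int) (p1 p2 : List Int) (q : List Int) :
    crossSum r (p1 ++ p2) q = crossSum r p1 q + crossSum r p2 q := by
  induction q with
  | nil => simp [crossSum]
  | cons b q ih => simp only [crossSum, hTerm_append, ih]; ring

lemma hSum_eq_cross (r : Int) (q : List Int) :
    ∀ pre, hSum r pre q = crossSum r pre q + hSum r [] q := by
  induction q with
  | nil => intro pre; simp [hSum, crossSum]
  | cons b q ih =>
    intro pre
    simp only [hSum, crossSum, List.nil_append]
    rw [ih (pre ++ [b]), ih [b], crossSum_append]
    have h0 : hTerm r [] b q = 0 := by simp [hTerm]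
    rw [h0]
    ring

lemma crossSum_singleton_eq_specJ (r b : Int) (q : List Int) :
    crossSum r [b] q = specJ r b q := by
  induction q with
  | nil => rfl
  | cons d2 rest ih =>
    simp only [crossSum, specJ, hTerm, ih]
    by_cases he : d2 = b * r
    · simp [List.countP_nil, he]
    · have hne : (b * r == d2) = false := beq_eq_false_iff_ne.mpr (fun h => he h.symm)
      simp [List.countP_nil, hne, he]

lemma hSum_nil_eq_specI (r : Int) (q : List Int) : hSum r [] q = specI r q := by
  induction q with
  | nil => rfl
  | cons b q ih =>
    simp only [hSum, specI, List.nil_append]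
    rw [hSum_eq_cross r q [b], crossSum_singleton_eq_specJ, ih]
    have : hTerm r [] b q = 0 := by simp [hTerm]
    rw [this]; ring

-- ===== gSum = hSum under Pre_ =====

lemma gTerm_eq_hTerm (r : Int) (pre : List Int) (b : Int) (q : List Int)
    (hb : r ≠ 0 ∨ b ≠ 0) : gTerm r pre b q = hTerm r pre b q := by
  unfold gTerm hTerm
  by_cases hr : r = 0
  · subst hr
    have h1 : pre.countP (fun a => a * 0 == b) = 0 := by
      rw [List.countP_eq_zero]
      intro a _
      rcases hb with h | h
      · omega
      · simp
        omega
    rw [if_neg (by simp), h1]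
    simp
  · by_cases hd : PySem.Int.mod b r = 0
    · have hfd : PySem.Int.floordiv b r * r = b := by
        have h2 := PySem.Int.floordiv_mul_add_mod b r
        rw [hd, add_zero] at h2
        exact h2
      have hcnt : pre.countP (fun a => a * r == b) = pre.count (PySem.Int.floordiv b r) := by
        unfold List.count
        apply List.countP_congr
        intro a _
        constructor
        · intro h
          have h' : a * r = b := by simpa using h
          have ha : a = PySem.Int.floordiv b r := by
            apply mul_right_cancel₀ hr
            rw [hfd, h']
          simp [ha]
        · intro h
          have h' : a = PySem.Int.floordiv b r := by simpa using h
          simp [h', hfd]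
      rw [if_pos ⟨hr, hd⟩, hcnt]
    · have h1 : pre.countP (fun a => a * r == b) = 0 := by
        rw [List.countP_eq_zero]
        intro a _
        simp
        intro he
        exact hd ((PySem.Int.mod_eq_zero_iff_dvd b r).mpr ⟨a, by rw [← he]; ring⟩)
      rw [if_neg (by tauto), h1]
      simp

lemma gSum_eq_hSum (r : Int) (q : List Int) (hq : r ≠ 0 ∨ ∀ b ∈ q, b = 1) :
    ∀ pre, gSum r pre q = hSum r pre q := by
  induction q with
  | nil => intro pre; rfl
  | cons b q ih =>
    intro pre
    have hb : r ≠ 0 ∨ b ≠ 0 := by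
      rcases hq with h | h
      · exact Or.inl h
      · have := h b (by simp); omega
    simp only [gSum, hSum, gTerm_eq_hTerm r pre b q hb]
    rw [ih (by rcases hq with h | h; exact Or.inl h; exact Or.inr (fun x hx => h x (by simp [hx])))]

-- ===== B's fold computes gSum =====

lemma stepB_fold (r : Int) (q : List Int) :
    ∀ (pre : List Int) (dr dl : PySem.Dict Int Int) (t : Int),
      (∀ v, dr.getD v 0 = (q.count v : Int)) →
      (∀ v, dl.getD v 0 = (pre.count v : Int)) →
      (q.foldl (pvStepB r) (dr, dl, t)).2.2 = t + gSum r pre q := by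
  induction q with
  | nil => intro pre dr dl t _ _; simp [gSum]
  | cons b q ih =>
    intro pre dr dl t hr hl
    simp only [List.foldl_cons]
    have hdr' : ∀ v, (dr.insert b (dr.getD b 0 - 1)).getD v 0 = (q.count v : Int) := by
      intro v
      rw [PySem.Dict.getD_insert]
      by_cases hv : v = b
      · subst hv
        rw [if_pos rfl, hr]
        simp
      · rw [if_neg hv, hr]
        rw [List.count_cons]
        simp
        omega
    have hdl' : ∀ v, (dl.insert b (dl.getD b 0 + 1)).getD v 0 = ((pre ++ [b]).count v : Int) := by
      intro v
      rw [PySem.Dict.getD_insert]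
      by_cases hv : v = b
      · subst hv
        rw [if_pos rfl, hl]
        simp [List.count_append]
      · rw [if_neg hv, hl]
        simp [List.count_append, List.count_cons]
        omega
    rw [show pvStepB r (dr, dl, t) b =
        (dr.insert b (dr.getD b 0 - 1), dl.insert b (dl.getD b 0 + 1),
          if r ≠ 0 ∧ PySem.Int.mod b r = 0 then
            t + dl.getD (PySem.Int.floordiv b r) 0 * (dr.insert b (dr.getD b 0 - 1)).getD (b * r) 0
          else t) from rfl]
    rw [ih (pre ++ [b]) _ _ _ hdr' hdl']
    simp only [gSum]
    have hterm : (if r ≠ 0 ∧ PySem.Int.mod b r = 0 then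
            t + dl.getD (PySem.Int.floordiv b r) 0 * (dr.insert b (dr.getD b 0 - 1)).getD (b * r) 0
          else t) = t + gTerm r pre b q := by
      unfold gTerm
      by_cases hc : r ≠ 0 ∧ PySem.Int.mod b r = 0
      · rw [if_pos hc, if_pos hc, hl, hdr' (b * r)]
      · rw [if_neg hc, if_neg hc]
        ring
    rw [hterm]
    ring

lemma rightCounter (s : List Int) (v : Int) :
    (s.foldl (fun d x => d.insert x (d.getD x 0 + 1)) PySem.Dict.empty).getD v 0 = (s.count v : Int) := by
  rw [PySem.Dict.getD_foldl_insert_add_one]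
  simp

lemma alt_eq_gSum (arr : List Int) (r : Int) :
    countTriplets_polynomial2_alt arr r =
      gSum r [] (PySem.List.sorted (arr.filter (fun x => x == 1 || PySem.Int.mod x r == 0)) (fun x => x) false) := by
  unfold countTriplets_polynomial2_alt
  rw [stepB_fold r _ [] _ _ _ (fun v => rightCounter _ v) (fun v => by simp)]
  simp

-- ===== VERDICT (by name: the statement is the Claim_ definition above) =====
theorem countTriplets_polynomial2_spec : Claim_equal_countTriplets_polynomial2 := by
  intro arr r _ hpre
  show countTriplets_polynomial2 arr r = countTriplets_polynomial2_alt arr r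
  set s := PySem.List.sorted (arr.filter (fun x => x == 1 || PySem.Int.mod x r == 0)) (fun x => x) false with hs
  have hp : s.Pairwise (· ≤ ·) := PySem.List.sorted_pairwise _ _
  have hA : countTriplets_polynomial2 arr r = specI r s := by
    unfold countTriplets_polynomial2
    rw [← hs, iloopA_eq s r hp 0 0]
    simp
  have hq : r ≠ 0 ∨ ∀ b ∈ s, b = 1 := by
    rcases hpre with h | h
    · exact Or.inl h
    · refine Or.inr (fun b hb => ?_)
      have : b ∈ arr.filter (fun x => x == 1 || PySem.Int.mod x r == 0) := by
        rw [← PySem.List.mem_sorted (key := fun x => x) (rev := false)]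
        exact hb
      exact h b (List.mem_of_mem_filter this)
  rw [hA, alt_eq_gSum, ← hs, gSum_eq_hSum r s hq [], hSum_nil_eq_specI]
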